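-- pv_equiv track=rewrite | github.com/YuliyaZinina/Hello-Python | seminar_4/task_5.py | get_sum_coefficients
-- ===== SOURCE A (Python) =====
-- def get_sum_coefficients(list_coefficients_1, list_coefficients_2):
--     rev_sum_coefficients = []
--
--     if len(list_coefficients_1) >= len(list_coefficients_2):
--         max_len_list = list(reversed(list_coefficients_1))
--         min_len_list = list(reversed(list_coefficients_2))
--     else:
--         max_len_list = list(reversed(list_coefficients_2))
--         min_len_list = list(reversed(list_coefficients_1))
--
--     for k in range(0, len(max_len_list)):
--         if k < len(min_len_list):
--             summa = int(max_len_list[k]) + int(min_len_list[k])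
--             rev_sum_coefficients.append(summa)
--         else:
--             rev_sum_coefficients.append(int(max_len_list[k]))
--
--     sum_coefficients = list(reversed(rev_sum_coefficients))
--     return sum_coefficients
-- ===== SOURCE B (Python) =====
-- def get_sum_coefficients(list_coefficients_1, list_coefficients_2):
--     if len(list_coefficients_1) >= len(list_coefficients_2):
--         longer, shorter = list_coefficients_1, list_coefficients_2
--     else:
--         longer, shorter = list_coefficients_2, list_coefficients_1
--     padded = [0] * (len(longer) - len(shorter)) + shorter
--     return [int(a) + int(b) for a, b in zip(longer, padded)]
-- ===== Notes on version B (the rewrite author's own statement) =====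
-- stated objective: simpler
-- what changed: Instead of reversing both lists, scanning from the low-order end with an index-bound branch, and reversing back, B front-pads the shorter list with zeros and adds the two equal-length lists elementwise in one zip, with no reversals or branches.
import Mathlib
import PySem

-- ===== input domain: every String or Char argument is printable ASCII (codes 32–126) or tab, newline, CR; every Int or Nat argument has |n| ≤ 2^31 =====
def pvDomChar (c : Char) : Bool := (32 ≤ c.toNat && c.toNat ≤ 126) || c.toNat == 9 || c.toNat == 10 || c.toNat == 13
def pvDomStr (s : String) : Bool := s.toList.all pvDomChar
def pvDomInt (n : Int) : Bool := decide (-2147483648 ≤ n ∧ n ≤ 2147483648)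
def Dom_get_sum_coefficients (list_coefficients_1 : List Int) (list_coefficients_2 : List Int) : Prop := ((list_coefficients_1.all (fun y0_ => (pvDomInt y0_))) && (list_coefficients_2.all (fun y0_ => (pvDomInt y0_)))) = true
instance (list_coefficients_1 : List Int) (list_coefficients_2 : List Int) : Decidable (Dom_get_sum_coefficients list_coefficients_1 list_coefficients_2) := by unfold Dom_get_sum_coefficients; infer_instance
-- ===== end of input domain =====

-- B replaces A's double reversal and low-order-end scan by front-padding the
-- shorter list with zeros and one elementwise zip; objective: simpler.

-- ===== PORT A =====
-- literal port of A: pick the reversed longer/shorter lists, loop k over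
-- range(len) appending under the in-bounds branch, then reverse back
-- (list[k] is always in range in A's loop, so it is ported as getD k 0)
def get_sum_coefficients (list_coefficients_1 : List Int) (list_coefficients_2 : List Int) : List Int :=
  let p := if list_coefficients_1.length ≥ list_coefficients_2.length
           then (list_coefficients_1.reverse, list_coefficients_2.reverse)
           else (list_coefficients_2.reverse, list_coefficients_1.reverse)
  let max_len_list := p.1
  let min_len_list := p.2
  let rev_sum_coefficients :=
    (List.range max_len_list.length).foldl
      (fun acc k =>
        if k < min_len_list.length then
          acc ++ [max_len_list.getD k 0 + min_len_list.getD k 0]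
        else
          acc ++ [max_len_list.getD k 0]) []
  rev_sum_coefficients.reverse

-- ===== PORT B =====
def get_sum_coefficients_alt (list_coefficients_1 : List Int) (list_coefficients_2 : List Int) : List Int :=
  let p := if list_coefficients_1.length ≥ list_coefficients_2.length
           then (list_coefficients_1, list_coefficients_2)
           else (list_coefficients_2, list_coefficients_1)
  let longer := p.1
  let shorter := p.2
  let padded := List.replicate (longer.length - shorter.length) 0 ++ shorter
  List.zipWith (fun a b => a + b) longer padded

-- ===== PRECONDITION & SPEC =====
def Spec_get_sum_coefficients (list_coefficients_1 : List Int) (list_coefficients_2 : List Int) (out : List Int) : Prop := out = get_sum_coefficients_alt list_coefficients_1 list_coefficients_2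
instance (list_coefficients_1 : List Int) (list_coefficients_2 : List Int) (out : List Int) : Decidable (Spec_get_sum_coefficients list_coefficients_1 list_coefficients_2 out) := by unfold Spec_get_sum_coefficients; infer_instance

-- ===== CLAIM (what is proved, stated in full; the proofs are below) =====
def Claim_equal_get_sum_coefficients : Prop := ∀ (list_coefficients_1 : List Int) (list_coefficients_2 : List Int), Dom_get_sum_coefficients list_coefficients_1 list_coefficients_2 → Spec_get_sum_coefficients list_coefficients_1 list_coefficients_2 (get_sum_coefficients list_coefficients_1 list_coefficients_2)

-- ===== LEMMAS AND PROOFS =====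

-- a fold that only pushes elements is a map
theorem foldl_push (l : List Nat) (acc : List Int) (g : Nat → Int) :
    l.foldl (fun a k => a ++ [g k]) acc = acc ++ l.map g := by
  induction l generalizing acc with
  | nil => simp
  | cons x xs ih => simp [List.foldl_cons, ih]

-- same list, equal indices, equal elements
theorem gei (l : List Int) (i j : Nat) (hi : i < l.length) (hj : j < l.length) (h : i = j) :
    l[i]'hi = l[j]'hj := by subst h; rfl

-- core equivalence for a longer list L and a shorter list S
theorem core (L S : List Int) (hle : S.length ≤ L.length) :
    ((List.range L.reverse.length).foldl
      (fun acc k =>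
        if k < S.reverse.length then
          acc ++ [L.reverse.getD k 0 + S.reverse.getD k 0]
        else
          acc ++ [L.reverse.getD k 0]) []).reverse
    = List.zipWith (fun a b => a + b) L (List.replicate (L.length - S.length) 0 ++ S) := by
  have hbody : (fun (acc : List Int) (k : Nat) =>
        if k < S.reverse.length then
          acc ++ [L.reverse.getD k 0 + S.reverse.getD k 0]
        else
          acc ++ [L.reverse.getD k 0])
      = (fun acc k => acc ++ [if k < S.reverse.length then
            L.reverse.getD k 0 + S.reverse.getD k 0 else L.reverse.getD k 0]) := by
    funext acc k; split <;> rfl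
  rw [hbody, foldl_push, List.nil_append]
  apply List.ext_getElem
  · simp; omega
  · intro i h1 h2
    have hiL : i < L.length := by simp at h1; omega
    simp only [List.getElem_reverse, List.length_map, List.length_range, List.length_reverse,
      List.getElem_map, List.getElem_range, List.getElem_zipWith]
    by_cases hc : i ≥ L.length - S.length
    · rw [if_pos (by omega)]
      rw [List.getD_eq_getElem _ _ (by simp only [List.length_reverse]; omega),
          List.getD_eq_getElem _ _ (by simp only [List.length_reverse]; omega)]
      rw [List.getElem_append_right (by simp only [List.length_replicate]; omega)]
      simp only [List.getElem_reverse]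
      congr 1
      · exact gei _ _ _ _ _ (by omega)
      · exact gei _ _ _ _ _ (by simp only [List.length_replicate]; omega)
    · rw [if_neg (by omega)]
      rw [List.getD_eq_getElem _ _ (by simp only [List.length_reverse]; omega)]
      rw [List.getElem_append_left (by simp only [List.length_replicate]; omega)]
      simp only [List.getElem_reverse, List.getElem_replicate]
      rw [add_zero]
      exact gei _ _ _ _ _ (by omega)

-- ===== VERDICT (by name: the statement is the Claim_ definition above) =====
theorem get_sum_coefficients_spec : Claim_equal_get_sum_coefficients := by
  intro l1 l2 _
  unfold Spec_get_sum_coefficients get_sum_coefficients get_sum_coefficients_alt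
  by_cases h : l1.length ≥ l2.length
  · simp only [if_pos h]
    exact core l1 l2 h
  · simp only [if_neg h]
    exact core l2 l1 (by omega)
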